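-- pv_equiv track=rewrite | github.com/CodingThrust/problem-reductions | docs/paper/verify-reductions/verify_k_satisfiability_precedence_constrained_scheduling.py | solve_pcs_brute
-- ===== SOURCE A (Python) =====
-- import itertools
--
-- def is_schedule_feasible(num_tasks: int, num_processors: int, deadline: int,
--                          precedences: list[tuple[int, int]],
--                          schedule: list[int]) -> bool:
--     """Check if a schedule is feasible for the PCS instance."""
--     if len(schedule) != num_tasks:
--         return False
--     # Check time slots are in range
--     for s in schedule:
--         if s < 0 or s >= deadline:
--             return False
--     # Check processor capacity
--     slot_count = [0] * deadline
--     for s in schedule: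
--         slot_count[s] += 1
--         if slot_count[s] > num_processors:
--             return False
--     # Check precedences: (i, j) means task i must finish before j starts
--     for (i, j) in precedences:
--         if schedule[j] < schedule[i] + 1:
--             return False
--     return True
--
-- def solve_pcs_brute(num_tasks: int, num_processors: int, deadline: int,
--                     precedences: list[tuple[int, int]]) -> list[int] | None:
--     """Brute-force PCS solver."""
--     for schedule in itertools.product(range(deadline), repeat=num_tasks):
--         s = list(schedule)
--         if is_schedule_feasible(num_tasks, num_processors, deadline,
--                                 precedences, s):
--             return s
--     return None
-- ===== SOURCE B (Python) =====
-- def _ok(precedences, sched, t, s):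
--     """Check every precedence whose latest endpoint is task t, given task t is put in slot s."""
--     for (i, j) in precedences:
--         if i <= t and j <= t and (i == t or j == t):
--             si = s if i == t else sched[i]
--             sj = s if j == t else sched[j]
--             if sj < si + 1:
--                 return False
--     return True
--
-- def solve_pcs_brute(num_tasks, num_processors, deadline, precedences):
--     """Depth-first backtracking: assign tasks 0..num_tasks-1 a slot 0..deadline-1 in
--     ascending order, pruning on capacity and precedence violations as soon as they
--     appear; the first complete assignment is the lexicographically smallest one."""
--     slot_count = [0] * deadline
--     sched = []
--
--     def dfs():
--         t = len(sched)
--         if t >= num_tasks: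
--             return list(sched)
--         for s in range(deadline):
--             if slot_count[s] < num_processors and _ok(precedences, sched, t, s):
--                 slot_count[s] += 1
--                 sched.append(s)
--                 r = dfs()
--                 if r is not None:
--                     return r
--                 sched.pop()
--                 slot_count[s] -= 1
--         return None
--
--     return dfs()
-- ===== Notes on version B (the rewrite author's own statement) =====
-- stated objective: alternative
-- what changed: Replaces full enumeration of all deadline^num_tasks candidate schedules with recursive depth-first backtracking that assigns each task the smallest workable slot first, maintaining an incremental slot_count and checking each precedence as soon as both endpoints are assigned, so only capacity/precedence-consistent prefixes are explored and the first complete assignment found is the lexicographically smallest feasible schedule (intended as faster; a timing run measured B 83x at the largest size both finished but could not confirm the label, both being exponential in the worst case).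
-- outside the precondition, e.g. on solve_pcs_brute(2, 1, 2, [(-1, 0)]): A returns [1, 0], B raises IndexError; on solve_pcs_brute(2, 1, 2, [(0, 0), (0, 5)]): A returns None, B returns None
import Mathlib
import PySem

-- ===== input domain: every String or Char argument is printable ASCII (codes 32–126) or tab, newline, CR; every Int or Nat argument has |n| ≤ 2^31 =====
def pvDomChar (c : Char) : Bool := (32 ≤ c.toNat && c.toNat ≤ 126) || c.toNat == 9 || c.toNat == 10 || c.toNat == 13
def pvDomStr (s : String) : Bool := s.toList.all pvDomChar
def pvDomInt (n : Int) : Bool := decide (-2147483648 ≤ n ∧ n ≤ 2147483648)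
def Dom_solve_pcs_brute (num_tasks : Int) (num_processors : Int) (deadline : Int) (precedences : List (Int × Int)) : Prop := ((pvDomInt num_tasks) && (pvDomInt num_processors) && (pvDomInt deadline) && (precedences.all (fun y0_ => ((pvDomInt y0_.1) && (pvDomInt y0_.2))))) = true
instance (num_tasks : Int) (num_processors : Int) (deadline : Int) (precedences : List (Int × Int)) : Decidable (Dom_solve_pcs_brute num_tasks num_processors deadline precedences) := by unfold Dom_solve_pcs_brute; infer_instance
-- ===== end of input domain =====

-- B replaces A's full enumeration of all deadline^num_tasks candidate schedules with
-- depth-first backtracking (ascending slots, incremental capacity/precedence pruning),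
-- returning the same lexicographically first feasible schedule.


-- ===== PORT A =====
-- 'for s in schedule: if s < 0 or s >= deadline: return False'
def pvRangeLoop (deadline : Int) : List Int → Bool
  | [] => true
  | s :: rest => if s < 0 ∨ deadline ≤ s then false else pvRangeLoop deadline rest

-- 'for s in schedule: slot_count[s] += 1; if slot_count[s] > num_processors: return False'
-- (pyGetD/pySetD are exact Python indexing wherever the index is in range, which holds
--  whenever this loop runs, since the range loop above has already passed)
def pvSlotLoop (num_processors : Int) : List Int → List Int → Bool
  | _, [] => true
  | slot_count, s :: rest =>
    let slot_count' := PySem.List.pySetD slot_count s (PySem.List.pyGetD slot_count s 0 + 1)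
    if num_processors < PySem.List.pyGetD slot_count' s 0 then false
    else pvSlotLoop num_processors slot_count' rest

-- 'for (i, j) in precedences: if schedule[j] < schedule[i] + 1: return False'
-- (exact under Pre_, whose index bounds make pyGetD total indexing)
def pvPrecLoop (schedule : List Int) : List (Int × Int) → Bool
  | [] => true
  | (i, j) :: rest =>
    if PySem.List.pyGetD schedule j 0 < PySem.List.pyGetD schedule i 0 + 1 then false
    else pvPrecLoop schedule rest

def is_schedule_feasible (num_tasks : Int) (num_processors : Int) (deadline : Int)
    (precedences : List (Int × Int)) (schedule : List Int) : Bool :=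
  if (schedule.length : Int) ≠ num_tasks then false
  else if pvRangeLoop deadline schedule = false then false
  else if pvSlotLoop num_processors (PySem.List.pyRepeat [0] deadline) schedule = false then false
  else pvPrecLoop schedule precedences

-- 'for schedule in itertools.product(range(deadline), repeat=num_tasks): if feasible:
-- return list(schedule)', evaluated lazily exactly as CPython's product iterator is:
-- the leftmost position varies slowest, each complete tuple is tested in order and the
-- first hit is returned (k counts the positions still to fill)
def pvProdSearch (choices : List Int) (test : List Int → Bool) : List Int → Nat → Option (List Int)
  | acc, 0 => if test acc then some acc else none
  | acc, k+1 => choices.findSome? fun x => pvProdSearch choices test (acc ++ [x]) k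

-- 'repeat=num_tasks' raises ValueError for negative num_tasks (outside Pre_), so .toNat
def solve_pcs_brute (num_tasks : Int) (num_processors : Int) (deadline : Int) (precedences : List (Int × Int)) : Option (List Int) :=
  pvProdSearch (PySem.List.pyRange 0 deadline 1)
    (fun s => is_schedule_feasible num_tasks num_processors deadline precedences s)
    [] num_tasks.toNat

-- ===== PORT B =====
-- _ok from Source B: check every precedence whose latest endpoint is task t = len(sched)
def pvOkLoop (sched : List Int) (t s : Int) : List (Int × Int) → Bool
  | [] => true
  | (i, j) :: rest =>
    if i ≤ t ∧ j ≤ t ∧ (i = t ∨ j = t) then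
      let si := if i = t then s else PySem.List.pyGetD sched i 0
      let sj := if j = t then s else PySem.List.pyGetD sched j 0
      if sj < si + 1 then false else pvOkLoop sched t s rest
    else pvOkLoop sched t s rest

-- dfs from Source B; the fuel argument is num_tasks - len(sched), so fuel = 0 is 't >= num_tasks'
def pvDfs (num_tasks : Int) (num_processors : Int) (deadline : Int) (precedences : List (Int × Int)) : List Int → List Int → Nat → Option (List Int)
  | sched, _, 0 => some sched
  | sched, slot_count, fuel+1 =>
    (PySem.List.pyRange 0 deadline 1).findSome? fun s =>
      if PySem.List.pyGetD slot_count s 0 < num_processors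
          ∧ pvOkLoop sched (sched.length : Int) s precedences = true then
        pvDfs num_tasks num_processors deadline precedences (sched ++ [s])
          (PySem.List.pySetD slot_count s (PySem.List.pyGetD slot_count s 0 + 1)) fuel
      else none

def solve_pcs_brute_alt (num_tasks : Int) (num_processors : Int) (deadline : Int) (precedences : List (Int × Int)) : Option (List Int) :=
  pvDfs num_tasks num_processors deadline precedences [] (PySem.List.pyRepeat [0] deadline) num_tasks.toNat

-- ===== PRECONDITION & SPEC =====
-- Pre_ excludes num_tasks < 0 (A raises ValueError in itertools.product) and precedence
-- pairs whose endpoints are not task indices 0..num_tasks-1 — unless no candidate can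
-- even satisfy the capacity constraints (deadline ≤ 0, or any slot use exceeds the
-- num_tasks ≤ 0 processors), in which case neither program ever reads the precedences
-- and both return None. On the
-- excluded inputs A raises IndexError whenever a candidate reaches the precedence check,
-- except (i) negative in-range endpoints, where A returns a value only via Python's
-- negative-index wraparound while the natural B raises IndexError, and (ii) inputs where
-- an earlier always-violated pair hides the bad index, where both return None anyway.
def Pre_solve_pcs_brute (num_tasks : Int) (num_processors : Int) (deadline : Int) (precedences : List (Int × Int)) : Prop :=
  0 ≤ num_tasks ∧
    ((∀ q ∈ precedences, 0 ≤ q.1 ∧ q.1 < num_tasks ∧ 0 ≤ q.2 ∧ q.2 < num_tasks) ∨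
      (0 < num_tasks ∧ (deadline ≤ 0 ∨ num_processors ≤ 0)))
instance (num_tasks : Int) (num_processors : Int) (deadline : Int) (precedences : List (Int × Int)) : Decidable (Pre_solve_pcs_brute num_tasks num_processors deadline precedences) := by unfold Pre_solve_pcs_brute; infer_instance

def pvWitness_solve_pcs_brute : Int × Int × Int × (List (Int × Int)) := (2, 1, 2, [(0, 1)])

def Spec_solve_pcs_brute (num_tasks : Int) (num_processors : Int) (deadline : Int) (precedences : List (Int × Int)) (out : Option (List Int)) : Prop := out = solve_pcs_brute_alt num_tasks num_processors deadline precedences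
instance (num_tasks : Int) (num_processors : Int) (deadline : Int) (precedences : List (Int × Int)) (out : Option (List Int)) : Decidable (Spec_solve_pcs_brute num_tasks num_processors deadline precedences out) := by unfold Spec_solve_pcs_brute; infer_instance

-- ===== CLAIM (what is proved, stated in full; the proofs are below) =====
def Claim_equal_solve_pcs_brute : Prop := ∀ (num_tasks : Int) (num_processors : Int) (deadline : Int) (precedences : List (Int × Int)), Dom_solve_pcs_brute num_tasks num_processors deadline precedences → Pre_solve_pcs_brute num_tasks num_processors deadline precedences → Spec_solve_pcs_brute num_tasks num_processors deadline precedences (solve_pcs_brute num_tasks num_processors deadline precedences)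

-- ===== LEMMAS AND PROOFS =====

-- the fully materialised itertools.product list, used only to state/prove the lemmas
def pvProduct (choices : List Int) : Nat → List (List Int)
  | 0 => [[]]
  | k+1 => choices.flatMap fun x => (pvProduct choices k).map fun t => x :: t

-- abbreviations for the loop invariants of the backtracking search
def pvInRange (d : Int) (l : List Int) : Prop := ∀ s ∈ l, 0 ≤ s ∧ s < d
def pvCapOK (p : Int) (l : List Int) : Prop := ∀ x ∈ l, (l.count x : Int) ≤ p
def pvPrecOK (precs : List (Int × Int)) (l : List Int) : Prop :=
  ∀ q ∈ precs, q.1 < (l.length : Int) → q.2 < (l.length : Int) →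
    l.getD q.1.toNat 0 + 1 ≤ l.getD q.2.toNat 0
def pvSCinv (d : Int) (acc sc : List Int) : Prop :=
  sc.length = d.toNat ∧ ∀ x : Int, 0 ≤ x → x < d → sc.getD x.toNat 0 = (acc.count x : Int)

lemma pvGetD_nonneg (xs : List Int) (i : Int) (h : 0 ≤ i) (dflt : Int) :
    PySem.List.pyGetD xs i dflt = xs.getD i.toNat dflt := by
  obtain ⟨m, rfl⟩ : ∃ m : Nat, i = (m : Int) := ⟨i.toNat, (Int.toNat_of_nonneg h).symm⟩
  simp

lemma pvGetD_set (l : List Int) (n m : Nat) (v d : Int) (hn : n < l.length) :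
    (l.set n v).getD m d = if m = n then v else l.getD m d := by
  by_cases hm : m = n
  · subst hm; simp [List.getD_eq_getElem?_getD, List.getElem?_set, hn]
  · simp [List.getD_eq_getElem?_getD, List.getElem?_set, Ne.symm hm, hm]

lemma pvGetD_replicate (k m : Nat) : (List.replicate k (0 : Int)).getD m 0 = 0 := by
  by_cases hm : m < k <;> simp [List.getD_eq_getElem?_getD, List.getElem?_replicate, hm]

lemma pvGetD_append_lt (u v : List Int) (m : Nat) (h : m < u.length) :
    (u ++ v).getD m 0 = u.getD m 0 := by
  simp [List.getD_eq_getElem?_getD, List.getElem?_append_left h]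

lemma pvGetD_append_self (acc : List Int) (s : Int) :
    (acc ++ [s]).getD acc.length 0 = s := by
  simp [List.getD_eq_getElem?_getD, List.getElem?_concat_length]

lemma pvRangeLoop_iff (d : Int) (l : List Int) : pvRangeLoop d l = true ↔ pvInRange d l := by
  induction l with
  | nil => simp [pvRangeLoop, pvInRange]
  | cons s rest ih =>
    by_cases h : s < 0 ∨ d ≤ s
    · simp only [pvRangeLoop, if_pos h]
      constructor
      · intro hf; exact absurd hf (by simp)
      · intro hall
        rcases hall s (List.mem_cons_self ..) with ⟨h1, h2⟩
        omega
    · simp only [pvRangeLoop, if_neg h]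
      rw [ih]
      unfold pvInRange
      constructor
      · intro hr x hx
        rcases List.mem_cons.1 hx with rfl | hx'
        · omega
        · exact hr x hx'
      · intro hall x hx; exact hall x (List.mem_cons_of_mem _ hx)

lemma pvSlotLoop_iff (p d : Int) (sc rest : List Int) (hlen : sc.length = d.toNat)
    (hrest : pvInRange d rest) :
    pvSlotLoop p sc rest = true ↔ ∀ x ∈ rest, sc.getD x.toNat 0 + (rest.count x : Int) ≤ p := by
  induction rest generalizing sc with
  | nil => simp [pvSlotLoop]
  | cons s rest ih =>
    rcases hrest s (List.mem_cons_self ..) with ⟨hs0, hsd⟩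
    have hsn : s.toNat < sc.length := by omega
    have hset : PySem.List.pySetD sc s (PySem.List.pyGetD sc s 0 + 1)
        = sc.set s.toNat (sc.getD s.toNat 0 + 1) := by
      rw [PySem.List.pySetD_of_nonneg _ _ hs0, pvGetD_nonneg _ _ hs0]
    have hgetEq : (sc.set s.toNat (sc.getD s.toNat 0 + 1)).getD s.toNat 0
        = sc.getD s.toNat 0 + 1 := by
      rw [pvGetD_set sc s.toNat s.toNat _ 0 hsn, if_pos rfl]
    have hgetNe : ∀ m : Nat, m ≠ s.toNat → (sc.set s.toNat (sc.getD s.toNat 0 + 1)).getD m 0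
        = sc.getD m 0 := by
      intro m hm
      rw [pvGetD_set sc s.toNat m _ 0 hsn, if_neg hm]
    have hget' : PySem.List.pyGetD (sc.set s.toNat (sc.getD s.toNat 0 + 1)) s 0
        = sc.getD s.toNat 0 + 1 := by
      rw [pvGetD_nonneg _ _ hs0, hgetEq]
    show (if p < PySem.List.pyGetD (PySem.List.pySetD sc s (PySem.List.pyGetD sc s 0 + 1)) s 0
        then false else pvSlotLoop p (PySem.List.pySetD sc s (PySem.List.pyGetD sc s 0 + 1)) rest)
        = true ↔ _
    rw [hset, hget']
    by_cases hlt : p < sc.getD s.toNat 0 + 1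
    · simp only [if_pos hlt]
      constructor
      · intro hf; exact absurd hf (by simp)
      · intro hall
        have := hall s (List.mem_cons_self ..)
        have hc : (s :: rest).count s = rest.count s + 1 := by
          simp [List.count_cons]
        omega
    · simp only [if_neg hlt]
      rw [ih _ (by simp [hlen]) (fun x hx => hrest x (List.mem_cons_of_mem _ hx))]
      constructor
      · intro H x hx
        rcases List.mem_cons.1 hx with rfl | hx'
        · by_cases hmem : x ∈ rest
          · have := H x hmem
            rw [hgetEq] at this
            have hc : (x :: rest).count x = rest.count x + 1 := by simp [List.count_cons]
            omega
          · have hc : (x :: rest).count x = rest.count x + 1 := by simp [List.count_cons]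
            have hc0 : rest.count x = 0 := List.count_eq_zero.2 hmem
            omega
        · rcases hrest x hx with ⟨hx0, _⟩
          by_cases hxs : x = s
          · subst hxs
            have := H x hx'
            rw [hgetEq] at this
            have hc : (x :: rest).count x = rest.count x + 1 := by simp [List.count_cons]
            omega
          · have hne : x.toNat ≠ s.toNat := by omega
            have := H x hx'
            rw [hgetNe x.toNat hne] at this
            have hc : (s :: rest).count x = rest.count x := by
              simp [List.count_cons, Ne.symm hxs]
            omega
      · intro H x hx
        rcases hrest x (List.mem_cons_of_mem _ hx) with ⟨hx0, _⟩
        have hmem := H x (List.mem_cons_of_mem _ hx)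
        by_cases hxs : x = s
        · subst hxs
          rw [hgetEq]
          have hc : (x :: rest).count x = rest.count x + 1 := by simp [List.count_cons]
          omega
        · have hne : x.toNat ≠ s.toNat := by omega
          rw [hgetNe x.toNat hne]
          have hc : (s :: rest).count x = rest.count x := by
            simp [List.count_cons, Ne.symm hxs]
          omega

lemma pvPrecLoop_iff (sched : List Int) (cs : List (Int × Int))
    (hnn : ∀ q ∈ cs, 0 ≤ q.1 ∧ 0 ≤ q.2) :
    pvPrecLoop sched cs = true ↔ ∀ q ∈ cs, sched.getD q.1.toNat 0 + 1 ≤ sched.getD q.2.toNat 0 := by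
  induction cs with
  | nil => simp [pvPrecLoop]
  | cons q rest ih =>
    obtain ⟨i, j⟩ := q
    rcases hnn (i, j) (List.mem_cons_self ..) with ⟨hi, hj⟩
    show (if PySem.List.pyGetD sched j 0 < PySem.List.pyGetD sched i 0 + 1 then false
        else pvPrecLoop sched rest) = true ↔ _
    rw [pvGetD_nonneg _ _ hi, pvGetD_nonneg _ _ hj]
    by_cases hlt : sched.getD j.toNat 0 < sched.getD i.toNat 0 + 1
    · simp only [if_pos hlt]
      constructor
      · intro hf; exact absurd hf (by simp)
      · intro hall
        have := hall (i, j) (List.mem_cons_self ..)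
        dsimp only at this
        omega
    · simp only [if_neg hlt]
      rw [ih (fun q hq => hnn q (List.mem_cons_of_mem _ hq))]
      constructor
      · intro H q hq
        rcases List.mem_cons.1 hq with rfl | hq'
        · dsimp only; omega
        · exact H q hq'
      · intro H q hq; exact H q (List.mem_cons_of_mem _ hq)

lemma pvFeas_iff (n p d : Int) (precs : List (Int × Int)) (sched : List Int)
    (hprecs : ∀ q ∈ precs, 0 ≤ q.1 ∧ 0 ≤ q.2) :
    is_schedule_feasible n p d precs sched = true ↔
      (sched.length : Int) = n ∧ pvInRange d sched ∧
      (∀ x ∈ sched, (sched.count x : Int) ≤ p) ∧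
      (∀ q ∈ precs, sched.getD q.1.toNat 0 + 1 ≤ sched.getD q.2.toNat 0) := by
  unfold is_schedule_feasible
  rw [PySem.List.pyRepeat_singleton]
  by_cases h1 : (sched.length : Int) ≠ n
  · simp only [if_pos h1]
    constructor
    · intro hf; exact absurd hf (by simp)
    · intro ⟨he, _⟩; exact absurd he h1
  · rw [if_neg h1]
    push_neg at h1
    by_cases h2 : pvRangeLoop d sched = false
    · simp only [if_pos h2]
      constructor
      · intro hf; exact absurd hf (by simp)
      · intro ⟨_, hir, _⟩
        have := (pvRangeLoop_iff d sched).2 hir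
        rw [this] at h2; exact absurd h2 (by simp)
    · rw [if_neg h2]
      have hir : pvInRange d sched := (pvRangeLoop_iff d sched).1 (by simpa using h2)
      have hslot := pvSlotLoop_iff p d (List.replicate d.toNat 0) sched
        (by simp) hir
      have hslot' : pvSlotLoop p (List.replicate d.toNat 0) sched = true ↔
          ∀ x ∈ sched, (sched.count x : Int) ≤ p := by
        rw [hslot]
        constructor
        · intro H x hx; have := H x hx; rw [pvGetD_replicate] at this; omega
        · intro H x hx; rw [pvGetD_replicate]; have := H x hx; omega
      by_cases h3 : pvSlotLoop p (List.replicate d.toNat 0) sched = false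
      · simp only [if_pos h3]
        constructor
        · intro hf; exact absurd hf (by simp)
        · intro ⟨_, _, hcap, _⟩
          have := hslot'.2 hcap
          rw [this] at h3; exact absurd h3 (by simp)
      · rw [if_neg h3]
        have hcap := hslot'.1 (by simpa using h3)
        rw [pvPrecLoop_iff sched precs hprecs]
        constructor
        · intro H; exact ⟨h1, hir, hcap, H⟩
        · intro ⟨_, _, _, H⟩; exact H

lemma pvMem_product (xs : List Int) (k : Nat) (t : List Int) (ht : t ∈ pvProduct xs k) :
    t.length = k ∧ ∀ s ∈ t, s ∈ xs := by
  induction k generalizing t with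
  | zero => simp [pvProduct] at ht; subst ht; simp
  | succ k ih =>
    simp only [pvProduct, List.mem_flatMap, List.mem_map] at ht
    obtain ⟨x, hx, t', ht', rfl⟩ := ht
    rcases ih t' ht' with ⟨hl, hm⟩
    refine ⟨by simp [hl], ?_⟩
    intro s hs
    rcases List.mem_cons.1 hs with rfl | hs'
    · exact hx
    · exact hm s hs'

lemma pvFind?_flatMap {α β : Type} (l : List α) (f : α → List β) (q : β → Bool) :
    (l.flatMap f).find? q = l.findSome? fun x => (f x).find? q := by
  induction l with
  | nil => simp
  | cons x l ih =>
    rw [List.flatMap_cons, List.find?_append, List.findSome?_cons, ih]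
    cases (f x).find? q <;> simp

lemma pvFindSome?_congr {α β : Type} (l : List α) (f g : α → Option β)
    (h : ∀ x ∈ l, f x = g x) : l.findSome? f = l.findSome? g := by
  induction l with
  | nil => simp
  | cons x l ih =>
    rw [List.findSome?_cons, List.findSome?_cons, h x (List.mem_cons_self ..),
      ih (fun y hy => h y (List.mem_cons_of_mem _ hy))]

lemma pvOkLoop_iff (acc : List Int) (s : Int) (cs : List (Int × Int))
    (hnn : ∀ q ∈ cs, 0 ≤ q.1 ∧ 0 ≤ q.2) :
    pvOkLoop acc (acc.length : Int) s cs = true ↔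
      ∀ q ∈ cs, q.1 ≤ (acc.length : Int) → q.2 ≤ (acc.length : Int) →
        (q.1 = (acc.length : Int) ∨ q.2 = (acc.length : Int)) →
        (acc ++ [s]).getD q.1.toNat 0 + 1 ≤ (acc ++ [s]).getD q.2.toNat 0 := by
  have hval : ∀ i : Int, 0 ≤ i → i ≤ (acc.length : Int) →
      (if i = (acc.length : Int) then s else PySem.List.pyGetD acc i 0)
        = (acc ++ [s]).getD i.toNat 0 := by
    intro i hi0 hile
    by_cases hie : i = (acc.length : Int)
    · rw [if_pos hie]
      have : i.toNat = acc.length := by omega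
      rw [this, pvGetD_append_self]
    · rw [if_neg hie, pvGetD_nonneg _ _ hi0, pvGetD_append_lt]
      omega
  induction cs with
  | nil => simp [pvOkLoop]
  | cons q rest ih =>
    obtain ⟨i, j⟩ := q
    rcases hnn (i, j) (List.mem_cons_self ..) with ⟨hi, hj⟩
    have ih' := ih (fun q hq => hnn q (List.mem_cons_of_mem _ hq))
    show (if i ≤ (acc.length : Int) ∧ j ≤ (acc.length : Int) ∧
          (i = (acc.length : Int) ∨ j = (acc.length : Int)) then _ else _) = true ↔ _
    by_cases hc : i ≤ (acc.length : Int) ∧ j ≤ (acc.length : Int) ∧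
        (i = (acc.length : Int) ∨ j = (acc.length : Int))
    · rw [if_pos hc]
      rw [hval i hi hc.1, hval j hj hc.2.1]
      by_cases hlt : (acc ++ [s]).getD j.toNat 0 < (acc ++ [s]).getD i.toNat 0 + 1
      · simp only [if_pos hlt]
        constructor
        · intro hf; exact absurd hf (by simp)
        · intro hall
          have := hall (i, j) (List.mem_cons_self ..) hc.1 hc.2.1 hc.2.2
          dsimp only at this
          omega
      · simp only [if_neg hlt]
        constructor
        · intro H q hq
          rcases List.mem_cons.1 hq with rfl | hq'
          · intro _ _ _; dsimp only; omega
          · exact ih'.1 H q hq'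
        · intro H; exact ih'.2 (fun q hq => H q (List.mem_cons_of_mem _ hq))
    · rw [if_neg hc]
      constructor
      · intro H q hq
        rcases List.mem_cons.1 hq with rfl | hq'
        · intro g1 g2 g3; exact absurd ⟨g1, g2, g3⟩ hc
        · exact ih'.1 H q hq'
      · intro H; exact ih'.2 (fun q hq => H q (List.mem_cons_of_mem _ hq))

lemma pvPrecOK_snoc (precs : List (Int × Int)) (acc : List Int) (s : Int)
    (hnn : ∀ q ∈ precs, 0 ≤ q.1 ∧ 0 ≤ q.2) (hacc : pvPrecOK precs acc) :
    (pvOkLoop acc (acc.length : Int) s precs = true ↔ pvPrecOK precs (acc ++ [s])) := by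
  rw [pvOkLoop_iff acc s precs hnn]
  unfold pvPrecOK
  constructor
  · intro H q hq g1 g2
    rcases hnn q hq with ⟨hq1, hq2⟩
    have hlen : ((acc ++ [s]).length : Int) = (acc.length : Int) + 1 := by
      simp
    rw [hlen] at g1 g2
    by_cases hedge : q.1 = (acc.length : Int) ∨ q.2 = (acc.length : Int)
    · exact H q hq (by omega) (by omega) hedge
    · push_neg at hedge
      have h1 : q.1.toNat < acc.length := by omega
      have h2 : q.2.toNat < acc.length := by omega
      rw [pvGetD_append_lt _ _ _ h1, pvGetD_append_lt _ _ _ h2]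
      exact hacc q hq (by omega) (by omega)
  · intro H q hq g1 g2 g3
    rcases hnn q hq with ⟨hq1, hq2⟩
    have hlen : ((acc ++ [s]).length : Int) = (acc.length : Int) + 1 := by
      simp
    exact H q hq (by rw [hlen]; omega) (by rw [hlen]; omega)

lemma pvInRange_snoc (d x : Int) (acc : List Int) (hir : pvInRange d acc)
    (hx0 : 0 ≤ x) (hxd : x < d) : pvInRange d (acc ++ [x]) := by
  intro y hy
  rcases List.mem_append.1 hy with hy' | hy'
  · exact hir y hy'
  · simp at hy'; subst hy'; exact ⟨hx0, hxd⟩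

lemma pvCap_snoc (p x : Int) (acc : List Int) (hcap : ∀ y ∈ acc, (acc.count y : Int) ≤ p)
    (hcapx : (acc.count x : Int) < p) :
    ∀ y ∈ acc ++ [x], ((acc ++ [x]).count y : Int) ≤ p := by
  intro y hy
  have hcnt : (acc ++ [x]).count y = acc.count y + if x = y then 1 else 0 := by
    simp [List.count_append, List.count_singleton]
  by_cases hxy : x = y
  · subst hxy; rw [hcnt]; rw [if_pos rfl]; push_cast; omega
  · rw [hcnt, if_neg hxy]
    rcases List.mem_append.1 hy with hy' | hy'
    · have := hcap y hy'; push_cast; push_cast at this; omega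
    · simp at hy'; exact absurd hy'.symm hxy

lemma pvSCinv_snoc (d x : Int) (acc sc : List Int) (hsc : pvSCinv d acc sc)
    (hx0 : 0 ≤ x) (hxd : x < d) :
    pvSCinv d (acc ++ [x]) (PySem.List.pySetD sc x (PySem.List.pyGetD sc x 0 + 1)) := by
  obtain ⟨hsclen, hscval⟩ := hsc
  have hxn : x.toNat < sc.length := by omega
  constructor
  · rw [PySem.List.pySetD_of_nonneg _ _ hx0]; simp [hsclen]
  · intro y hy0 hyd
    rw [PySem.List.pySetD_of_nonneg _ _ hx0, pvGetD_nonneg _ _ hx0,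
      pvGetD_set sc x.toNat y.toNat _ 0 hxn]
    have hcnt : (acc ++ [x]).count y = acc.count y + if x = y then 1 else 0 := by
      simp [List.count_append, List.count_singleton]
    by_cases hxy : y = x
    · subst hxy
      rw [if_pos rfl, hscval y hy0 hyd, hcnt]
      simp
    · have hne : y.toNat ≠ x.toNat := by omega
      rw [if_neg hne, hscval y hy0 hyd, hcnt, if_neg (fun h => hxy h.symm)]
      simp

lemma pvSearch_eq (ch : List Int) (test : List Int → Bool) :
    ∀ (k : Nat) (acc : List Int),
      pvProdSearch ch test acc k = ((pvProduct ch k).map (fun t => acc ++ t)).find? test := by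
  intro k
  induction k with
  | zero =>
    intro acc
    cases h : test acc <;> simp [pvProdSearch, pvProduct, h]
  | succ k ih =>
    intro acc
    have hstep : (pvProduct ch (k + 1)).map (fun t => acc ++ t)
        = ch.flatMap (fun x => (pvProduct ch k).map (fun t => (acc ++ [x]) ++ t)) := by
      show ((ch.flatMap (fun x => (pvProduct ch k).map (fun t => x :: t))).map
          (fun t => acc ++ t)) = _
      rw [List.map_flatMap]
      congr 1
      funext x
      rw [List.map_map]
      congr 1
      funext t
      simp
    rw [hstep, pvFind?_flatMap]
    show (ch.findSome? fun x => pvProdSearch ch test (acc ++ [x]) k) = _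
    exact pvFindSome?_congr _ _ _ (fun x _ => by rw [ih])

lemma pvFeas_caps (n p d : Int) (precs : List (Int × Int)) (sched : List Int)
    (h : is_schedule_feasible n p d precs sched = true) :
    (sched.length : Int) = n ∧ pvInRange d sched ∧ ∀ x ∈ sched, (sched.count x : Int) ≤ p := by
  unfold is_schedule_feasible at h
  rw [PySem.List.pyRepeat_singleton] at h
  by_cases h1 : (sched.length : Int) ≠ n
  · rw [if_pos h1] at h; exact absurd h (by simp)
  rw [if_neg h1] at h
  push_neg at h1
  by_cases h2 : pvRangeLoop d sched = false
  · rw [if_pos h2] at h; exact absurd h (by simp)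
  rw [if_neg h2] at h
  have hir := (pvRangeLoop_iff d sched).1 (by simpa using h2)
  by_cases h3 : pvSlotLoop p (List.replicate d.toNat 0) sched = false
  · rw [if_pos h3] at h; exact absurd h (by simp)
  have hslot := (pvSlotLoop_iff p d (List.replicate d.toNat 0) sched (by simp) hir).1 (by simpa using h3)
  refine ⟨h1, hir, ?_⟩
  intro x hx
  have := hslot x hx
  rw [pvGetD_replicate] at this
  omega

lemma pvDfs_eq (n p d : Int) (precs : List (Int × Int)) (hn : 0 ≤ n)
    (hprecs : ∀ q ∈ precs, 0 ≤ q.1 ∧ q.1 < n ∧ 0 ≤ q.2 ∧ q.2 < n) :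
    ∀ (k : Nat) (acc sc : List Int), acc.length + k = n.toNat →
      pvInRange d acc → pvCapOK p acc → pvPrecOK precs acc → pvSCinv d acc sc →
      ((pvProduct (PySem.List.pyRange 0 d 1) k).map (fun t => acc ++ t)).find?
          (fun s => is_schedule_feasible n p d precs s)
        = pvDfs n p d precs acc sc k := by
  have hnn : ∀ q ∈ precs, 0 ≤ q.1 ∧ 0 ≤ q.2 := fun q hq => ⟨(hprecs q hq).1, (hprecs q hq).2.2.1⟩
  intro k
  induction k with
  | zero =>
    intro acc sc hlen hir hcap hprec hsc
    have hfeas : is_schedule_feasible n p d precs acc = true := by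
      rw [pvFeas_iff n p d precs acc hnn]
      refine ⟨by omega, hir, hcap, ?_⟩
      intro q hq
      rcases hprecs q hq with ⟨h1, h2, h3, h4⟩
      exact hprec q hq (by omega) (by omega)
    simp [pvProduct, pvDfs, List.find?, hfeas]
  | succ k ih =>
    intro acc sc hlen hir hcap hprec hsc
    obtain ⟨hsclen, hscval⟩ := hsc
    have hstep : (pvProduct (PySem.List.pyRange 0 d 1) (k + 1)).map (fun t => acc ++ t)
        = (PySem.List.pyRange 0 d 1).flatMap
            (fun x => (pvProduct (PySem.List.pyRange 0 d 1) k).map (fun t => (acc ++ [x]) ++ t)) := by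
      show ((PySem.List.pyRange 0 d 1).flatMap
          (fun x => (pvProduct (PySem.List.pyRange 0 d 1) k).map (fun t => x :: t))).map
          (fun t => acc ++ t) = _
      rw [List.map_flatMap]
      congr 1
      funext x
      rw [List.map_map]
      congr 1
      funext t
      simp
    rw [hstep, pvFind?_flatMap]
    show _ = (PySem.List.pyRange 0 d 1).findSome? _
    apply pvFindSome?_congr
    intro x hx
    rcases (PySem.List.mem_pyRange_one).1 hx with ⟨hx0, hxd⟩
    have hxn : x.toNat < sc.length := by omega
    have hgetx : PySem.List.pyGetD sc x 0 = (acc.count x : Int) := by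
      rw [pvGetD_nonneg _ _ hx0, hscval x hx0 hxd]
    by_cases hcond : PySem.List.pyGetD sc x 0 < p
          ∧ pvOkLoop acc ((acc.length : Nat) : Int) x precs = true
    · rw [if_pos hcond]
      have hcapx : (acc.count x : Int) < p := by rw [← hgetx]; exact hcond.1
      have hprec' : pvPrecOK precs (acc ++ [x]) :=
        (pvPrecOK_snoc precs acc x hnn hprec).1 hcond.2
      apply ih (acc ++ [x])
      · simp; omega
      · exact pvInRange_snoc d x acc hir hx0 hxd
      · exact pvCap_snoc p x acc hcap hcapx
      · exact hprec'
      · exact pvSCinv_snoc d x acc sc ⟨hsclen, hscval⟩ hx0 hxd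
    · rw [if_neg hcond]
      rw [List.find?_eq_none]
      intro sched hsched
      rcases List.mem_map.1 hsched with ⟨t, ht, rfl⟩
      rcases pvMem_product _ _ _ ht with ⟨htl, htm⟩
      intro hF
      rw [pvFeas_iff n p d precs _ hnn] at hF
      obtain ⟨hFl, hFir, hFcap, hFprec⟩ := hF
      by_cases hcapx : PySem.List.pyGetD sc x 0 < p
      · -- capacity fine, so the precedence check must have failed
        have hok : ¬ pvOkLoop acc ((acc.length : Nat) : Int) x precs = true := by
          intro hok; exact hcond ⟨hcapx, hok⟩
        have hnp : ¬ pvPrecOK precs (acc ++ [x]) := by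
          intro hP; exact hok ((pvPrecOK_snoc precs acc x hnn hprec).2 hP)
        unfold pvPrecOK at hnp
        push_neg at hnp
        obtain ⟨q, hq, g1, g2, hviol⟩ := hnp
        rcases hnn q hq with ⟨hq1, hq2⟩
        have hlen1 : ((acc ++ [x]).length : Int) = (acc.length : Int) + 1 := by
          simp
        rw [hlen1] at g1 g2
        have h1 : q.1.toNat < (acc ++ [x]).length := by simp; omega
        have h2 : q.2.toNat < (acc ++ [x]).length := by simp; omega
        have := hFprec q hq
        rw [pvGetD_append_lt _ _ _ h1, pvGetD_append_lt _ _ _ h2] at this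
        omega
      · -- the slot is already full
        have hple : p ≤ (acc.count x : Int) := by rw [hgetx] at hcapx; omega
        have hxmem : x ∈ (acc ++ [x]) ++ t := by simp
        have := hFcap x hxmem
        have hcnt : ((acc ++ [x]) ++ t).count x = acc.count x + 1 + t.count x := by
          simp [List.count_append]; omega
        rw [hcnt] at this
        push_cast at this
        omega

-- ===== VERDICT (by name: the statement is the Claim_ definition above) =====
theorem solve_pcs_brute_spec : Claim_equal_solve_pcs_brute := by
  intro n p d precs _ hpre
  obtain ⟨hn, hrest⟩ := hpre
  unfold Spec_solve_pcs_brute solve_pcs_brute solve_pcs_brute_alt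
  have hsc0 : pvSCinv d [] (PySem.List.pyRepeat [0] d) := by
    rw [PySem.List.pyRepeat_singleton]
    refine ⟨by simp, ?_⟩
    intro y hy0 hyd
    rw [pvGetD_replicate]
    simp
  rcases hrest with hprecs | ⟨hn1, hinf⟩
  · rw [pvSearch_eq]
    exact pvDfs_eq n p d precs hn hprecs n.toNat [] (PySem.List.pyRepeat [0] d)
      (by simp) (by intro s hs; simp at hs) (by intro x hx; simp at hx)
      (by intro q hq g1 g2; simp at g1 g2; rcases hprecs q hq with ⟨h1, _⟩; omega)
      hsc0
  · -- no candidate can satisfy the capacity constraints: both searches return none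
    have hA : pvProdSearch (PySem.List.pyRange 0 d 1)
        (fun s => is_schedule_feasible n p d precs s) [] n.toNat = none := by
      rw [pvSearch_eq, List.find?_eq_none]
      intro sched _ hF
      rcases pvFeas_caps n p d precs sched hF with ⟨hFl, hFir, hFcap⟩
      have hne : sched ≠ [] := by
        intro h; subst h; simp at hFl; omega
      obtain ⟨a, ha⟩ := List.exists_mem_of_ne_nil sched hne
      rcases hinf with hd | hp
      · have := hFir a ha; omega
      · have h1 : 0 < sched.count a := List.count_pos_iff.2 ha
        have := hFcap a ha
        omega
    have hB : pvDfs n p d precs [] (PySem.List.pyRepeat [0] d) n.toNat = none := by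
      obtain ⟨k, hk⟩ : ∃ k, n.toNat = k + 1 := ⟨n.toNat - 1, by omega⟩
      rw [hk]
      simp only [pvDfs]
      rcases hinf with hd | hp
      · rw [PySem.List.pyRange_one_eq_nil (by omega)]
        simp
      · rw [List.findSome?_eq_none_iff]
        intro x hx
        rcases PySem.List.mem_pyRange_one.1 hx with ⟨hx0, hxd⟩
        have hc : ¬(PySem.List.pyGetD (PySem.List.pyRepeat [0] d) x 0 < p
            ∧ pvOkLoop [] ((List.length ([] : List Int) : Nat) : Int) x precs = true) := by
          intro ⟨hlt, _⟩
          obtain ⟨_, hval⟩ := hsc0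
          rw [pvGetD_nonneg _ _ hx0, hval x hx0 hxd] at hlt
          simp at hlt
          omega
        rw [if_neg hc]
    rw [hA, hB]
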